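-- pv_equiv track=rewrite | github.com/Dori-Tos/Project-AI-Labyrinthe | Util_fonctions.py | tile_turner
-- ===== SOURCE A (Python) =====
-- def tile_turner(tile, rotation): # tourne de 90° degrés vers la droite autant de fois que le nbr rotation le demande
-- 	if rotation == 0:
-- 		return tile
-- 	else:
-- 		n = 0
-- 		while n < rotation:
-- 			temp = dict(tile)
-- 			tile.update({"E": temp.get("N")})
-- 			tile.update({"S": temp.get("E")})
-- 			tile.update({"W": temp.get("S")})
-- 			tile.update({"N": temp.get("W")})
-- 			n += 1
-- 	return tile
-- ===== SOURCE B (Python) =====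
-- def tile_turner(tile, rotation):  # rotation has period 4: one pass suffices; mutates tile in place like the original
-- 	if rotation <= 0:
-- 		return tile
-- 	vals = [tile["N"], tile["E"], tile["S"], tile["W"]]
-- 	r = rotation % 4
-- 	for i, key in enumerate(["N", "E", "S", "W"]):
-- 		tile[key] = vals[(i - r) % 4]
-- 	return tile
-- ===== Notes on version B (the rewrite author's own statement) =====
-- stated objective: alternative
-- what changed: B replaces A's loop of `rotation` full dict-rewrite iterations by a single pass that reads the four direction values once and writes each key the value shifted by rotation % 4, using the period-4 cycle of the quarter turn (constant number of dict operations instead of one rewrite per requested rotation).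
-- outside the precondition, e.g. on tile_turner({'N': True}, 1): A returns {'N': None, 'E': True, 'S': None, 'W': None}, B raises KeyError
import Mathlib
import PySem

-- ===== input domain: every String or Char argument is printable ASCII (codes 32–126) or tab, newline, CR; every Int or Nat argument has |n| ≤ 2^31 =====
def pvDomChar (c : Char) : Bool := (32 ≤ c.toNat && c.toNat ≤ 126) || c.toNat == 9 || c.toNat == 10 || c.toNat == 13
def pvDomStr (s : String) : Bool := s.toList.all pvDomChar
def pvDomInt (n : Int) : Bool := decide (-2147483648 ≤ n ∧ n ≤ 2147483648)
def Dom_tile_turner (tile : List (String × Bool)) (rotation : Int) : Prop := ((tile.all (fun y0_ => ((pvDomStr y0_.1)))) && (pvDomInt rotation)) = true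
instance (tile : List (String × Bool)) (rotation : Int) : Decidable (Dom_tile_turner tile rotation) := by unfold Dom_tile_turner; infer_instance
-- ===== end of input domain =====

-- B replaces A's rotation-times update loop by a single pass using the period-4 cycle (rotation % 4).
-- Both Pythons mutate `tile` in place identically; the equivalence proved here is about the return value.

-- ===== PORT A =====
-- one iteration of A's while body: temp = dict(tile); tile["E"]=temp["N"]; tile["S"]=temp["E"]; tile["W"]=temp["S"]; tile["N"]=temp["W"]
-- (the fallback branch is where Python would store None values — excluded by Pre_)
def stepA (d : PySem.Dict String Bool) : PySem.Dict String Bool :=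
  match d.get? "N", d.get? "E", d.get? "S", d.get? "W" with
  | some n, some e, some s, some w =>
      (((d.insert "E" n).insert "S" e).insert "W" s).insert "N" w
  | _, _, _, _ => d

-- the while loop 'n = 0; while n < rotation: …; n += 1' run its number of iterations
def aLoop : Nat → PySem.Dict String Bool → PySem.Dict String Bool
  | 0, d => d
  | n + 1, d => aLoop n (stepA d)

def tile_turner (tile : List (String × Bool)) (rotation : Int) : List (String × Bool) :=
  let d := PySem.Dict.ofList tile
  (if rotation = 0 then d else aLoop rotation.toNat d).items

-- ===== PORT B =====
def tile_turner_alt (tile : List (String × Bool)) (rotation : Int) : List (String × Bool) :=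
  let d := PySem.Dict.ofList tile
  (if rotation ≤ 0 then d
   else
     match d.get? "N", d.get? "E", d.get? "S", d.get? "W" with
     | some n, some e, some s, some w =>
         let vals : List Bool := [n, e, s, w]
         let r := PySem.Int.mod rotation 4
         (PySem.List.enumerate ["N", "E", "S", "W"]).foldl
           (fun t p => t.insert p.2 (PySem.List.pyGetD vals (PySem.Int.mod (p.1 - r) 4) false)) d
     | _, _, _, _ => d   -- Python raises KeyError here; excluded by Pre_
   ).items

-- ===== PRECONDITION & SPEC =====
-- Pre_ excludes only rotation > 0 with one of the keys "N","E","S","W" missing: there A returns a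
-- dict containing None values (not a value of the declared dict[str,bool] type) and B raises KeyError.
def Pre_tile_turner (tile : List (String × Bool)) (rotation : Int) : Prop :=
  rotation ≤ 0 ∨ ("N" ∈ tile.map Prod.fst ∧ "E" ∈ tile.map Prod.fst ∧
                  "S" ∈ tile.map Prod.fst ∧ "W" ∈ tile.map Prod.fst)
instance (tile : List (String × Bool)) (rotation : Int) : Decidable (Pre_tile_turner tile rotation) := by
  unfold Pre_tile_turner; infer_instance

def pvWitness_tile_turner : (List (String × Bool)) × Int :=
  ([("N", true), ("E", false), ("S", true), ("W", false)], 5)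

def Spec_tile_turner (tile : List (String × Bool)) (rotation : Int) (out : List (String × Bool)) : Prop := out = tile_turner_alt tile rotation
instance (tile : List (String × Bool)) (rotation : Int) (out : List (String × Bool)) : Decidable (Spec_tile_turner tile rotation out) := by unfold Spec_tile_turner; infer_instance

-- ===== CLAIM (what is proved, stated in full; the proofs are below) =====
def Claim_equal_tile_turner : Prop := ∀ (tile : List (String × Bool)) (rotation : Int), Dom_tile_turner tile rotation → Pre_tile_turner tile rotation → Spec_tile_turner tile rotation (tile_turner tile rotation)

-- ===== LEMMAS AND PROOFS =====

-- extensionality for the dicts involved: same keys (nodup) and same lookups ⇒ same dict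
lemma dict_eq_of_keys_getD (d1 d2 : PySem.Dict String Bool) (hk : d1.keys = d2.keys)
    (hnd : d1.keys.Nodup) (h : ∀ k, d1.getD k false = d2.getD k false) : d1 = d2 := by
  apply PySem.Dict.ext
  rw [PySem.Dict.items_eq_map_keys d1 hnd false, PySem.Dict.items_eq_map_keys d2 (hk ▸ hnd) false, hk]
  exact List.map_congr_left (fun k _ => by rw [h k])

lemma stepA_eq (d : PySem.Dict String Bool) (n e s w : Bool)
    (hn : d.get? "N" = some n) (he : d.get? "E" = some e)
    (hs : d.get? "S" = some s) (hw : d.get? "W" = some w) :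
    stepA d = (((d.insert "E" n).insert "S" e).insert "W" s).insert "N" w := by
  simp [stepA, hn, he, hs, hw]

lemma get?_stepA (d : PySem.Dict String Bool) (n e s w : Bool)
    (hn : d.get? "N" = some n) (he : d.get? "E" = some e)
    (hs : d.get? "S" = some s) (hw : d.get? "W" = some w) (k : String) :
    (stepA d).get? k = if k = "N" then some w else if k = "W" then some s
      else if k = "S" then some e else if k = "E" then some n else d.get? k := by
  rw [stepA_eq d n e s w hn he hs hw]
  simp [PySem.Dict.get?_insert]

lemma keys_stepA (d : PySem.Dict String Bool) (n e s w : Bool)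
    (hn : d.get? "N" = some n) (he : d.get? "E" = some e)
    (hs : d.get? "S" = some s) (hw : d.get? "W" = some w) :
    (stepA d).keys = d.keys := by
  have cN : d.contains "N" = true := by rw [PySem.Dict.contains_eq_isSome_get?, hn]; rfl
  have cE : d.contains "E" = true := by rw [PySem.Dict.contains_eq_isSome_get?, he]; rfl
  have cS : d.contains "S" = true := by rw [PySem.Dict.contains_eq_isSome_get?, hs]; rfl
  have cW : d.contains "W" = true := by rw [PySem.Dict.contains_eq_isSome_get?, hw]; rfl
  rw [stepA_eq d n e s w hn he hs hw]
  rw [PySem.Dict.keys_insert_of_contains _ _ (by simp [PySem.Dict.contains_insert, cN])]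
  rw [PySem.Dict.keys_insert_of_contains _ _ (by simp [PySem.Dict.contains_insert, cW])]
  rw [PySem.Dict.keys_insert_of_contains _ _ (by simp [PySem.Dict.contains_insert, cS])]
  rw [PySem.Dict.keys_insert_of_contains _ _ cE]

-- one full period of A's loop is the identity (on tiles carrying all four keys)
lemma aLoop_four (d : PySem.Dict String Bool) (n e s w : Bool)
    (hn : d.get? "N" = some n) (he : d.get? "E" = some e)
    (hs : d.get? "S" = some s) (hw : d.get? "W" = some w)
    (hnd : d.keys.Nodup) : aLoop 4 d = d := by
  have h1 := get?_stepA d n e s w hn he hs hw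
  have hn1 : (stepA d).get? "N" = some w := by rw [h1]; simp
  have he1 : (stepA d).get? "E" = some n := by rw [h1]; simp
  have hs1 : (stepA d).get? "S" = some e := by rw [h1]; simp
  have hw1 : (stepA d).get? "W" = some s := by rw [h1]; simp
  have h2 := get?_stepA _ w n e s hn1 he1 hs1 hw1
  have hn2 : (stepA (stepA d)).get? "N" = some s := by rw [h2]; simp
  have he2 : (stepA (stepA d)).get? "E" = some w := by rw [h2]; simp
  have hs2 : (stepA (stepA d)).get? "S" = some n := by rw [h2]; simp
  have hw2 : (stepA (stepA d)).get? "W" = some e := by rw [h2]; simp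
  have h3 := get?_stepA _ s w n e hn2 he2 hs2 hw2
  have hn3 : (stepA (stepA (stepA d))).get? "N" = some e := by rw [h3]; simp
  have he3 : (stepA (stepA (stepA d))).get? "E" = some s := by rw [h3]; simp
  have hs3 : (stepA (stepA (stepA d))).get? "S" = some w := by rw [h3]; simp
  have hw3 : (stepA (stepA (stepA d))).get? "W" = some n := by rw [h3]; simp
  have h4 := get?_stepA _ e s w n hn3 he3 hs3 hw3
  have hL : aLoop 4 d = stepA (stepA (stepA (stepA d))) := rfl
  have hk : (aLoop 4 d).keys = d.keys := by
    rw [hL, keys_stepA _ e s w n hn3 he3 hs3 hw3, keys_stepA _ s w n e hn2 he2 hs2 hw2,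
        keys_stepA _ w n e s hn1 he1 hs1 hw1, keys_stepA _ n e s w hn he hs hw]
  refine dict_eq_of_keys_getD _ _ hk (hk ▸ hnd) (fun k => ?_)
  rw [PySem.Dict.getD_eq_get?_getD, PySem.Dict.getD_eq_get?_getD, hL, h4, h3, h2, h1]
  split_ifs <;> simp_all

lemma aLoop_add (a b : Nat) (d : PySem.Dict String Bool) :
    aLoop (a + b) d = aLoop a (aLoop b d) := by
  induction b generalizing d with
  | zero => rfl
  | succ b ih =>
      have : a + (b + 1) = (a + b) + 1 := by omega
      rw [this]
      show aLoop (a + b) (stepA d) = _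
      rw [ih (stepA d)]
      rfl

lemma aLoop_mod (m : Nat) (d : PySem.Dict String Bool) (n e s w : Bool)
    (hn : d.get? "N" = some n) (he : d.get? "E" = some e)
    (hs : d.get? "S" = some s) (hw : d.get? "W" = some w)
    (hnd : d.keys.Nodup) : aLoop m d = aLoop (m % 4) d := by
  induction m using Nat.strong_induction_on with
  | _ m ih =>
    by_cases h : m < 4
    · rw [Nat.mod_eq_of_lt h]
    · have h4 : m = (m - 4) + 4 := by omega
      rw [h4, aLoop_add, aLoop_four d n e s w hn he hs hw hnd,
          ih (m - 4) (by omega), show (m - 4) % 4 = ((m - 4) + 4) % 4 by omega]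

lemma contains_ofList_of_mem (ps : List (String × Bool)) (k : String)
    (h : k ∈ ps.map Prod.fst) : (PySem.Dict.ofList ps).contains k = true := by
  rw [PySem.Dict.contains_iff_mem_keys]
  show k ∈ ((PySem.Dict.empty (κ := String) (ν := Bool)).update ps).keys
  rw [PySem.Dict.update, PySem.Dict.keys_foldl_insert_key ps Prod.fst (fun _ x => x.2)]
  simp [PySem.Dict.keys_empty, PySem.Set.update_nil_left, PySem.Set.mem_ofList, h]

-- keys are unchanged by a chain of four inserts on already-present keys
lemma keys_chain4 (d : PySem.Dict String Bool) (k1 k2 k3 k4 : String) (v1 v2 v3 v4 : Bool)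
    (h1 : d.contains k1 = true) (h2 : d.contains k2 = true)
    (h3 : d.contains k3 = true) (h4 : d.contains k4 = true) :
    ((((d.insert k1 v1).insert k2 v2).insert k3 v3).insert k4 v4).keys = d.keys := by
  rw [PySem.Dict.keys_insert_of_contains _ _ (by simp [PySem.Dict.contains_insert, h4]),
      PySem.Dict.keys_insert_of_contains _ _ (by simp [PySem.Dict.contains_insert, h3]),
      PySem.Dict.keys_insert_of_contains _ _ (by simp [PySem.Dict.contains_insert, h2]),
      PySem.Dict.keys_insert_of_contains _ _ h1]

-- ===== VERDICT (by name: the statement is the Claim_ definition above) =====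
set_option maxHeartbeats 1600000 in
theorem tile_turner_spec : Claim_equal_tile_turner := by
  intro tile rotation _ hpre
  unfold Spec_tile_turner tile_turner tile_turner_alt
  by_cases hle : rotation ≤ 0
  · by_cases h0 : rotation = 0
    · simp [h0]
    · have ht : rotation.toNat = 0 := by omega
      simp [hle, h0, ht, aLoop]
  · have h0 : ¬ rotation = 0 := by omega
    rcases hpre with hpre | ⟨hN, hE, hS, hW⟩
    · omega
    simp only []
    set d := PySem.Dict.ofList tile with hd
    have cN : d.contains "N" = true := contains_ofList_of_mem tile "N" hN
    have cE : d.contains "E" = true := contains_ofList_of_mem tile "E" hE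
    have cS : d.contains "S" = true := contains_ofList_of_mem tile "S" hS
    have cW : d.contains "W" = true := contains_ofList_of_mem tile "W" hW
    obtain ⟨n, hn⟩ := Option.isSome_iff_exists.mp (by rw [← PySem.Dict.contains_eq_isSome_get? d "N"]; exact cN)
    obtain ⟨e, he⟩ := Option.isSome_iff_exists.mp (by rw [← PySem.Dict.contains_eq_isSome_get? d "E"]; exact cE)
    obtain ⟨s, hs⟩ := Option.isSome_iff_exists.mp (by rw [← PySem.Dict.contains_eq_isSome_get? d "S"]; exact cS)
    obtain ⟨w, hw⟩ := Option.isSome_iff_exists.mp (by rw [← PySem.Dict.contains_eq_isSome_get? d "W"]; exact cW)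
    have hnd : d.keys.Nodup := PySem.Dict.nodup_keys_ofList tile
    -- base lookups as getD facts
    have gn : d.getD "N" false = n := PySem.Dict.getD_of_get?_eq_some d false hn
    have ge : d.getD "E" false = e := PySem.Dict.getD_of_get?_eq_some d false he
    have gs : d.getD "S" false = s := PySem.Dict.getD_of_get?_eq_some d false hs
    have gw : d.getD "W" false = w := PySem.Dict.getD_of_get?_eq_some d false hw
    -- lookups of the iterated A-step
    have h1 := get?_stepA d n e s w hn he hs hw
    have hn1 : (stepA d).get? "N" = some w := by rw [h1]; simp
    have he1 : (stepA d).get? "E" = some n := by rw [h1]; simp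
    have hs1 : (stepA d).get? "S" = some e := by rw [h1]; simp
    have hw1 : (stepA d).get? "W" = some s := by rw [h1]; simp
    have h2 := get?_stepA _ w n e s hn1 he1 hs1 hw1
    have hn2 : (stepA (stepA d)).get? "N" = some s := by rw [h2]; simp
    have he2 : (stepA (stepA d)).get? "E" = some w := by rw [h2]; simp
    have hs2 : (stepA (stepA d)).get? "S" = some n := by rw [h2]; simp
    have hw2 : (stepA (stepA d)).get? "W" = some e := by rw [h2]; simp
    have h3 := get?_stepA _ s w n e hn2 he2 hs2 hw2
    have hk1 : (stepA d).keys = d.keys := keys_stepA d n e s w hn he hs hw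
    have hk2 : (stepA (stepA d)).keys = d.keys := by
      rw [keys_stepA _ w n e s hn1 he1 hs1 hw1, hk1]
    have hk3 : (stepA (stepA (stepA d))).keys = d.keys := by
      rw [keys_stepA _ s w n e hn2 he2 hs2 hw2, hk2]
    -- reduce A's loop modulo 4
    rw [if_neg h0, aLoop_mod rotation.toNat d n e s w hn he hs hw hnd, if_neg hle]
    -- reduce B's match
    rw [hn, he, hs, hw]
    have hr : PySem.Int.mod rotation 4 = ((rotation.toNat % 4 : Nat) : Int) := by
      rw [PySem.Int.mod_eq_emod_of_pos (by norm_num)]; omega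
    have hlt : rotation.toNat % 4 < 4 := Nat.mod_lt _ (by norm_num)
    congr 1
    interval_cases hc : rotation.toNat % 4
    · rw [hr]
      show aLoop 0 d = (((d.insert "N" n).insert "E" e).insert "S" s).insert "W" w
      refine dict_eq_of_keys_getD _ _ ?_ ?_ ?_
      · rw [keys_chain4 d _ _ _ _ _ _ _ _ cN cE cS cW]
        rfl
      · exact hnd
      · intro k
        
        simp only [PySem.Dict.getD_insert]
        split_ifs <;> simp_all [PySem.Dict.getD_eq_get?_getD, aLoop]
    · rw [hr]
      show aLoop 1 d = (((d.insert "N" w).insert "E" n).insert "S" e).insert "W" s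
      refine dict_eq_of_keys_getD _ _ ?_ ?_ ?_
      · rw [keys_chain4 d _ _ _ _ _ _ _ _ cN cE cS cW]
        exact hk1
      · show (aLoop 1 d).keys.Nodup ; rw [show (aLoop 1 d).keys = d.keys from hk1] ; exact hnd
      · intro k
        rw [show (aLoop 1 d).getD k false = ((aLoop 1 d).get? k).getD false from PySem.Dict.getD_eq_get?_getD _ _ _, show (aLoop 1 d).get? k = _ from h1 k]
        simp only [PySem.Dict.getD_insert]
        split_ifs <;> simp_all [PySem.Dict.getD_eq_get?_getD]
    · rw [hr]
      show aLoop 2 d = (((d.insert "N" s).insert "E" w).insert "S" n).insert "W" e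
      refine dict_eq_of_keys_getD _ _ ?_ ?_ ?_
      · rw [keys_chain4 d _ _ _ _ _ _ _ _ cN cE cS cW]
        exact hk2
      · show (aLoop 2 d).keys.Nodup ; rw [show (aLoop 2 d).keys = d.keys from hk2] ; exact hnd
      · intro k
        rw [show (aLoop 2 d).getD k false = ((aLoop 2 d).get? k).getD false from PySem.Dict.getD_eq_get?_getD _ _ _, show (aLoop 2 d).get? k = _ from h2 k]
        simp only [PySem.Dict.getD_insert]
        split_ifs <;> simp_all [PySem.Dict.getD_eq_get?_getD]
    · rw [hr]
      show aLoop 3 d = (((d.insert "N" e).insert "E" s).insert "S" w).insert "W" n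
      refine dict_eq_of_keys_getD _ _ ?_ ?_ ?_
      · rw [keys_chain4 d _ _ _ _ _ _ _ _ cN cE cS cW]
        exact hk3
      · show (aLoop 3 d).keys.Nodup ; rw [show (aLoop 3 d).keys = d.keys from hk3] ; exact hnd
      · intro k
        rw [show (aLoop 3 d).getD k false = ((aLoop 3 d).get? k).getD false from PySem.Dict.getD_eq_get?_getD _ _ _, show (aLoop 3 d).get? k = _ from h3 k]
        simp only [PySem.Dict.getD_insert]
        split_ifs <;> simp_all [PySem.Dict.getD_eq_get?_getD]
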